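-- pv_equiv track=rewrite | github.com/Alarion239/HUDS-menu-planner | huds_lib/parser.py | _clean_nutrition_facts
-- ===== SOURCE A (Python) =====
-- from typing import Dict, List, Optional, Tuple
--
-- def _clean_nutrition_facts(nutrition: Dict) -> Dict:
--     """Clean up and organize nutrition facts"""
--     cleaned = {}
--
--     # Define the order we want for nutrition facts
--     desired_order = [
--         'Total Fat', 'Saturated Fat', 'Trans Fat',
--         'Cholesterol', 'Sodium', 'Total Carbohydrate',
--         'Dietary Fiber', 'Total Sugars', 'Added Sugars',
--         'Protein', 'Vitamin D', 'Calcium', 'Iron', 'Potassium'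
--     ]
--
--     # Add nutrition facts in desired order
--     for key in desired_order:
--         if key in nutrition:
--             cleaned[key] = nutrition[key]
--
--     # Add any remaining nutrition facts not in the standard list
--     for key, value in nutrition.items():
--         if key not in cleaned and key not in ['Calories', 'Fat', 'Carbohydrates']:  # Skip duplicates
--             cleaned[key] = value
--
--     return cleaned
-- ===== SOURCE B (Python) =====
-- def _clean_nutrition_facts(nutrition):
--     """Clean up and organize nutrition facts"""
--     desired_order = [
--         'Total Fat', 'Saturated Fat', 'Trans Fat',
--         'Cholesterol', 'Sodium', 'Total Carbohydrate',
--         'Dietary Fiber', 'Total Sugars', 'Added Sugars',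
--         'Protein', 'Vitamin D', 'Calcium', 'Iron', 'Potassium'
--     ]
--     rank = {key: i for i, key in enumerate(desired_order)}
--     skip = {'Calories', 'Fat', 'Carbohydrates'}
--     keys = [key for key in nutrition if key not in skip]
--     keys = sorted(keys, key=lambda key: rank.get(key, len(desired_order)))
--     return {key: nutrition[key] for key in keys}
-- ===== Notes on version B (the rewrite author's own statement) =====
-- stated objective: alternative
-- what changed: Replaces A's two sequential build passes (desired-order pass with membership tests, then a leftover pass) by a rank dict plus one stable sort of the non-skipped keys keyed by rank-with-sentinel, then a single dict comprehension in that order.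
import Mathlib
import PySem

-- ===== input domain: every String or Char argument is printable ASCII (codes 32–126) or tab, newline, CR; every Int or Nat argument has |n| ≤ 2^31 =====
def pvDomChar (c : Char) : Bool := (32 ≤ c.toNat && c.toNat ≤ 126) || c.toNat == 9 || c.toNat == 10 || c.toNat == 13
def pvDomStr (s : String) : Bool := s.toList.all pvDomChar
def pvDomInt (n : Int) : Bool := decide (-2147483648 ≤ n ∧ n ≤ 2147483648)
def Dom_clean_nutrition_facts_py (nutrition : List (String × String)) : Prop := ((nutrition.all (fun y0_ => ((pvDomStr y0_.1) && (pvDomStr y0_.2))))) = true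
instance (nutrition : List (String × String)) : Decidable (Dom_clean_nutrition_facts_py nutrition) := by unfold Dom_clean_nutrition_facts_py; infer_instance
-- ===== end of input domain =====

-- B replaces A's two sequential build passes by a rank dict + one stable sort of the
-- non-skipped keys (sentinel rank for non-desired keys) + one dict comprehension: an
-- alternative single-ordering formulation, same observable result.

-- shared string constants of the module (the desired-order list and the skip names)
def pvD : List String :=
  ["Total Fat", "Saturated Fat", "Trans Fat",
   "Cholesterol", "Sodium", "Total Carbohydrate",
   "Dietary Fiber", "Total Sugars", "Added Sugars",
   "Protein", "Vitamin D", "Calcium", "Iron", "Potassium"]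

def pvS : List String := ["Calories", "Fat", "Carbohydrates"]

-- ===== PORT A =====
-- The dict parameter arrives as its item list; 'PySem.Dict.ofList' is the standard decoding
-- of the Python dict value (insertion order, last value wins on duplicate keys).
-- 'nutrition[key]' is ported as '(get? …).getD ""': it is only evaluated under the
-- 'key in nutrition' guard, where get? is some.
def clean_nutrition_facts_py (nutrition : List (String × String)) : List (String × String) :=
  let d := PySem.Dict.ofList nutrition
  let desired_order : List String := pvD
  let cleaned : PySem.Dict String String :=
    desired_order.foldl (fun c key =>
      if PySem.Dict.contains d key then
        PySem.Dict.insert c key ((PySem.Dict.get? d key).getD "")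
      else c) PySem.Dict.empty
  let cleaned :=
    (PySem.Dict.items d).foldl (fun c kv =>
      if !(PySem.Dict.contains c kv.1) && !(pvS.contains kv.1) then
        PySem.Dict.insert c kv.1 kv.2
      else c) cleaned
  PySem.Dict.items cleaned

-- ===== PORT B =====
-- 'nutrition[key]' again ported as '(get? …).getD ""': every sorted key is a key of d.
def clean_nutrition_facts_py_alt (nutrition : List (String × String)) : List (String × String) :=
  let desired_order : List String := pvD
  let rank : PySem.Dict String Int :=
    (PySem.List.enumerate desired_order).foldl (fun r p => PySem.Dict.insert r p.2 p.1) PySem.Dict.empty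
  let skip : PySem.Set String := PySem.Set.ofList pvS
  let d := PySem.Dict.ofList nutrition
  let keys := (PySem.Dict.keys d).filter (fun key => !(PySem.Set.contains skip key))
  let keys := PySem.List.sorted keys (fun key => PySem.Dict.getD rank key ((desired_order.length : Int))) false
  PySem.Dict.items
    (keys.foldl (fun c key => PySem.Dict.insert c key ((PySem.Dict.get? d key).getD "")) PySem.Dict.empty)

-- ===== PRECONDITION & SPEC =====
def Spec_clean_nutrition_facts_py (nutrition : List (String × String)) (out : List (String × String)) : Prop := out = clean_nutrition_facts_py_alt nutrition
instance (nutrition : List (String × String)) (out : List (String × String)) : Decidable (Spec_clean_nutrition_facts_py nutrition out) := by unfold Spec_clean_nutrition_facts_py; infer_instance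

-- ===== CLAIM (what is proved, stated in full; the proofs are below) =====
def Claim_equal_clean_nutrition_facts_py : Prop := ∀ (nutrition : List (String × String)), Dom_clean_nutrition_facts_py nutrition → Spec_clean_nutrition_facts_py nutrition (clean_nutrition_facts_py nutrition)

-- ===== LEMMAS AND PROOFS =====

-- B's rank dict and its key function, as standalone names
def pvRank : PySem.Dict String Int :=
  (PySem.List.enumerate pvD).foldl (fun r p => PySem.Dict.insert r p.2 p.1) PySem.Dict.empty

def pvK (k : String) : Int := PySem.Dict.getD pvRank k 14

lemma pvRank_eq : pvRank = PySem.Dict.mk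
    [("Total Fat", 0), ("Saturated Fat", 1), ("Trans Fat", 2), ("Cholesterol", 3),
     ("Sodium", 4), ("Total Carbohydrate", 5), ("Dietary Fiber", 6), ("Total Sugars", 7),
     ("Added Sugars", 8), ("Protein", 9), ("Vitamin D", 10), ("Calcium", 11),
     ("Iron", 12), ("Potassium", 13)] := by decide

lemma pvK_of_not_mem (a : String) (h : a ∉ pvD) : pvK a = 14 := by
  simp only [pvD, List.mem_cons, not_or] at h
  obtain ⟨h1, h2, h3, h4, h5, h6, h7, h8, h9, h10, h11, h12, h13, h14, -⟩ := h
  unfold pvK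
  rw [pvRank_eq, PySem.Dict.getD_eq_get?_getD]
  simp only [PySem.Dict.get?_mk_cons]
  rw [if_neg (by simp only [beq_iff_eq]; exact fun e => h1 e.symm),
      if_neg (by simp only [beq_iff_eq]; exact fun e => h2 e.symm),
      if_neg (by simp only [beq_iff_eq]; exact fun e => h3 e.symm),
      if_neg (by simp only [beq_iff_eq]; exact fun e => h4 e.symm),
      if_neg (by simp only [beq_iff_eq]; exact fun e => h5 e.symm),
      if_neg (by simp only [beq_iff_eq]; exact fun e => h6 e.symm),
      if_neg (by simp only [beq_iff_eq]; exact fun e => h7 e.symm),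
      if_neg (by simp only [beq_iff_eq]; exact fun e => h8 e.symm),
      if_neg (by simp only [beq_iff_eq]; exact fun e => h9 e.symm),
      if_neg (by simp only [beq_iff_eq]; exact fun e => h10 e.symm),
      if_neg (by simp only [beq_iff_eq]; exact fun e => h11 e.symm),
      if_neg (by simp only [beq_iff_eq]; exact fun e => h12 e.symm),
      if_neg (by simp only [beq_iff_eq]; exact fun e => h13 e.symm),
      if_neg (by simp only [beq_iff_eq]; exact fun e => h14 e.symm)]
  rfl

lemma pvK_le (a : String) : pvK a ≤ 14 := by
  by_cases h : a ∈ pvD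
  · fin_cases h <;> decide
  · rw [pvK_of_not_mem a h]

lemma pvK_lt_iff (a : String) : a ∈ pvD ↔ pvK a < 14 := by
  constructor
  · intro h; fin_cases h <;> decide
  · intro h; by_contra hn; rw [pvK_of_not_mem a hn] at h; omega

lemma pvD_pairwise : pvD.Pairwise (fun a b => pvK a < pvK b) := by decide

lemma pvD_nodup : pvD.Nodup := by decide

lemma pvK_inj : ∀ a ∈ pvD, ∀ b ∈ pvD, pvK a = pvK b → a = b := by decide

lemma pvD_not_skip : ∀ a ∈ pvD, pvS.contains a = false := by decide

-- insertBy of x into a list whose "key x < key ·" region is a suffix and whose keys avoid key x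
lemma pv_insertBy_split (key : String → Int) (x : String) (l : List String)
    (hmono : l.Pairwise (fun a b => key x < key a → key x < key b))
    (hne : ∀ a ∈ l, key a ≠ key x) :
    PySem.List.insertBy (fun a b => decide (key a < key b)) x l
      = l.filter (fun a => decide (key a < key x)) ++ x :: l.filter (fun a => !(decide (key a < key x))) := by
  induction l with
  | nil => simp [PySem.List.insertBy]
  | cons a l ih =>
    rw [List.pairwise_cons] at hmono
    obtain ⟨ha, hm⟩ := hmono
    by_cases h : key x < key a
    · have hall : ∀ b ∈ l, ¬ key b < key x := fun b hb => not_lt.mpr (le_of_lt (ha b hb h))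
      have hax : ¬ key a < key x := not_lt.mpr (le_of_lt h)
      have h1 : l.filter (fun b => decide (key b < key x)) = [] := by
        rw [List.filter_eq_nil_iff]; intro b hb; simpa using hall b hb
      have h2 : l.filter (fun b => !(decide (key b < key x))) = l := by
        rw [List.filter_eq_self]; intro b hb; simpa using hall b hb
      simp [PySem.List.insertBy, h, h1, h2, hax]
    · have hax : key a < key x :=
        lt_of_le_of_ne (not_lt.mp h) (hne a (List.mem_cons_self))
      have step : PySem.List.insertBy (fun a b => decide (key a < key b)) x (a :: l)
          = a :: PySem.List.insertBy (fun a b => decide (key a < key b)) x l := by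
        simp [PySem.List.insertBy, h]
      rw [step, ih hm (fun b hb => hne b (List.mem_cons_of_mem _ hb))]
      simp [hax]

lemma pv_sorted_append_singleton (key : String → Int) (xs : List String) (x : String) :
    PySem.List.sorted (xs ++ [x]) key false
      = PySem.List.insertBy (fun a b => decide (key a < key b)) x (PySem.List.sorted xs key false) := by
  rw [PySem.List.sorted_eq_foldl_insertBy, PySem.List.sorted_eq_foldl_insertBy, List.foldl_append]
  rfl

-- the stable sort by rank-with-sentinel: desired keys first in desired order, the rest in input order
lemma pv_sorted_char : ∀ xs : List String, xs.Nodup →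
    PySem.List.sorted xs pvK false
      = pvD.filter (fun k => decide (k ∈ xs)) ++ xs.filter (fun k => !(decide (k ∈ pvD))) := by
  intro xs
  induction xs using List.reverseRecOn with
  | nil => intro _; simp [PySem.List.sorted]
  | append_singleton xs x ih =>
    intro hnd
    have hnd' : xs.Nodup := (List.nodup_append.mp hnd).1
    have hx : x ∉ xs := by
      intro hmem
      exact ((List.nodup_append.mp hnd).2.2 x hmem x (List.mem_singleton_self x)) rfl
    rw [pv_sorted_append_singleton, ih hnd']
    by_cases hxD : x ∈ pvD
    · -- x is a desired key: insert it at its rank position within the desired block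
      obtain ⟨s, t, hst⟩ := List.append_of_mem hxD
      have hDp := pvD_pairwise
      have hDnd := pvD_nodup
      rw [hst] at hDp hDnd
      have hs_lt : ∀ a ∈ s, pvK a < pvK x := by
        intro a hmem
        exact (List.pairwise_append.mp hDp).2.2 a hmem x (List.mem_cons_self)
      have ht_gt : ∀ b ∈ t, pvK x < pvK b := by
        intro b hmem
        exact (List.pairwise_cons.mp (List.pairwise_append.mp hDp).2.1).1 b hmem
      have hxs : x ∉ s := by
        intro hmem
        exact ((List.nodup_append.mp hDnd).2.2 x hmem x (List.mem_cons_self)) rfl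
      have hxt : x ∉ t := (List.nodup_cons.mp (List.nodup_append.mp hDnd).2.1).1
      -- names for the two blocks
      set lo := pvD.filter (fun k => decide (k ∈ xs)) with hlo
      set hi := xs.filter (fun k => !(decide (k ∈ pvD))) with hhi
      have hhiK : ∀ a ∈ hi, pvK a = 14 := by
        intro a hmem
        rw [hhi] at hmem
        have := List.of_mem_filter hmem
        exact pvK_of_not_mem a (by simpa using this)
      have hxlt : pvK x < 14 := (pvK_lt_iff x).mp hxD
      have hloPw : lo.Pairwise (fun a b => pvK a < pvK b) := List.Pairwise.filter _ pvD_pairwise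
      have hmono : (lo ++ hi).Pairwise (fun a b => pvK x < pvK a → pvK x < pvK b) := by
        rw [List.pairwise_append]
        refine ⟨hloPw.imp (fun h hx => lt_trans hx h), ?_, ?_⟩
        · exact List.pairwise_of_forall_mem_list (fun a _ b hb _ => by rw [hhiK b hb]; exact hxlt)
        · intro a _ b hb _; rw [hhiK b hb]; exact hxlt
      have hne : ∀ a ∈ lo ++ hi, pvK a ≠ pvK x := by
        intro a hmem
        rcases List.mem_append.mp hmem with hmem | hmem
        · rw [hlo] at hmem
          have haD : a ∈ pvD := List.mem_of_mem_filter hmem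
          have haxs : a ∈ xs := by simpa using List.of_mem_filter hmem
          intro hk
          exact hx (by rwa [pvK_inj a haD x hxD hk] at haxs)
        · rw [hhiK a hmem]; omega
      rw [pv_insertBy_split pvK x (lo ++ hi) hmono hne]
      -- compute the filters of lo ++ hi
      have hfl1 : (lo ++ hi).filter (fun a => decide (pvK a < pvK x))
          = s.filter (fun k => decide (k ∈ xs)) := by
        rw [List.filter_append]
        have h2 : hi.filter (fun a => decide (pvK a < pvK x)) = [] := by
          rw [List.filter_eq_nil_iff]; intro b hb; simp [hhiK b hb]; omega
        rw [h2, List.append_nil, hlo, List.filter_filter, hst]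
        rw [List.filter_append, List.filter_cons]
        have hxfalse : ¬ (decide (pvK x < pvK x) && decide (x ∈ xs)) = true := by simp
        rw [if_neg hxfalse]
        have h3 : t.filter (fun a => decide (pvK a < pvK x) && decide (a ∈ xs)) = [] := by
          rw [List.filter_eq_nil_iff]; intro b hb; have := ht_gt b hb; simp; intro h; omega
        rw [h3, List.append_nil]
        exact List.filter_congr (fun a hmem => by have := hs_lt a hmem; simp [this])
      have hfl2 : (lo ++ hi).filter (fun a => !(decide (pvK a < pvK x)))
          = t.filter (fun k => decide (k ∈ xs)) ++ hi := by
        rw [List.filter_append]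
        have h2 : hi.filter (fun a => !(decide (pvK a < pvK x))) = hi := by
          rw [List.filter_eq_self]; intro b hb; simp [hhiK b hb]; omega
        rw [h2, hlo, List.filter_filter, hst]
        rw [List.filter_append, List.filter_cons]
        have hxfalse : ¬ ((!(decide (pvK x < pvK x))) && decide (x ∈ xs)) = true := by simp [hx]
        rw [if_neg hxfalse]
        have h3 : s.filter (fun a => (!(decide (pvK a < pvK x))) && decide (a ∈ xs)) = [] := by
          rw [List.filter_eq_nil_iff]; intro b hb; have := hs_lt b hb; simp; intro h; omega
        rw [h3, List.nil_append]
        congr 1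
        exact List.filter_congr (fun a hmem => by have := ht_gt a hmem; simp; omega)
      rw [hfl1, hfl2]
      -- compute the right-hand side
      have hrhs1 : pvD.filter (fun k => decide (k ∈ xs ++ [x]))
          = s.filter (fun k => decide (k ∈ xs)) ++ x :: t.filter (fun k => decide (k ∈ xs)) := by
        rw [hst, List.filter_append, List.filter_cons]
        have : (decide (x ∈ xs ++ [x])) = true := by simp
        rw [if_pos this]
        congr 1
        · exact List.filter_congr (fun a hmem => by
            have hax : a ≠ x := fun h => hxs (h ▸ hmem)
            simp [hax])
        · congr 1
          exact List.filter_congr (fun a hmem => by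
            have hax : a ≠ x := fun h => hxt (h ▸ hmem)
            simp [hax])
      have hrhs2 : (xs ++ [x]).filter (fun k => !(decide (k ∈ pvD))) = hi := by
        rw [List.filter_append, hhi]
        simp [hxD]
      rw [hrhs1, hrhs2]
      simp
    · -- x is not a desired key: it goes to the end of the list
      have hkx : pvK x = 14 := pvK_of_not_mem x hxD
      rw [PySem.List.insertBy_of_forall_not_before]
      · have hrhs1 : pvD.filter (fun k => decide (k ∈ xs ++ [x]))
            = pvD.filter (fun k => decide (k ∈ xs)) := by
          exact List.filter_congr (fun a hmem => by
            have hax : a ≠ x := fun h => hxD (h ▸ hmem)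
            simp [hax])
        rw [hrhs1, List.filter_append, List.append_assoc]
        congr 2
        simp [hxD]
      · intro y hy
        have hykey : pvK y ≤ 14 := pvK_le y
        simp [hkx]; omega

-- A's first pass: items of the conditional-insert fold over a fresh nodup key list
lemma pv_pass1 (d : PySem.Dict String String) :
    ∀ (D' : List String) (acc : PySem.Dict String String), D'.Nodup →
      (∀ k ∈ D', acc.contains k = false) →
      (D'.foldl (fun c key =>
          if PySem.Dict.contains d key then
            PySem.Dict.insert c key ((PySem.Dict.get? d key).getD "")
          else c) acc).items
        = acc.items ++ (D'.filter (fun k => PySem.Dict.contains d k)).map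
            (fun k => (k, (PySem.Dict.get? d k).getD "")) := by
  intro D'
  induction D' with
  | nil => intro acc _ _; simp
  | cons k D'' ih =>
    intro acc hnd hfr
    simp only [List.foldl_cons, List.filter_cons]
    by_cases hc : PySem.Dict.contains d k
    · rw [if_pos hc, if_pos hc]
      have hacc : acc.contains k = false := hfr k List.mem_cons_self
      rw [ih (acc.insert k ((PySem.Dict.get? d k).getD "")) (List.nodup_cons.mp hnd).2 ?fresh]
      · rw [PySem.Dict.items_insert_of_not_contains acc _ hacc, List.append_assoc]
        simp
      case fresh =>
        intro k' hk'
        rw [PySem.Dict.contains_insert]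
        have hne : k' ≠ k := fun e => (List.nodup_cons.mp hnd).1 (e ▸ hk')
        simp [hne, hfr k' (List.mem_cons_of_mem _ hk')]
    · rw [if_neg hc, if_neg hc]
      exact ih acc (List.nodup_cons.mp hnd).2 (fun k' h => hfr k' (List.mem_cons_of_mem _ h))

lemma pv_pass1_nodup (d : PySem.Dict String String) :
    ∀ (D' : List String) (acc : PySem.Dict String String), acc.keys.Nodup →
      (D'.foldl (fun c key =>
          if PySem.Dict.contains d key then
            PySem.Dict.insert c key ((PySem.Dict.get? d key).getD "")
          else c) acc).keys.Nodup := by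
  intro D'
  induction D' with
  | nil => intro acc h; simpa using h
  | cons k D'' ih =>
    intro acc h
    simp only [List.foldl_cons]
    by_cases hc : PySem.Dict.contains d k
    · rw [if_pos hc]
      exact ih _ (PySem.Dict.nodup_keys_insert acc k _ h)
    · rw [if_neg hc]
      exact ih _ h

-- A's second pass over the items of d: with the already-present keys characterised by cfun,
-- the loop appends exactly the items whose key is neither present nor skipped
lemma pv_pass2 (cfun : String → Bool) :
    ∀ (l : List (String × String)) (acc : PySem.Dict String String),
      (l.map (fun x => x.1)).Nodup → acc.keys.Nodup →
      (∀ p ∈ l, acc.contains p.1 = cfun p.1) →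
      (l.foldl (fun c kv =>
          if !(PySem.Dict.contains c kv.1) && !(pvS.contains kv.1) then
            PySem.Dict.insert c kv.1 kv.2
          else c) acc).items
        = acc.items ++ l.filter (fun p => !(cfun p.1) && !(pvS.contains p.1)) := by
  intro l
  induction l with
  | nil => intro acc _ _ _; simp
  | cons p l ih =>
    intro acc hnd hknd hfr
    simp only [List.map_cons, List.nodup_cons] at hnd
    have hp := hfr p List.mem_cons_self
    simp only [List.foldl_cons, List.filter_cons]
    by_cases h1 : cfun p.1
    · rw [if_neg (by simp [hp, h1]), if_neg (by simp [h1])]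
      exact ih acc hnd.2 hknd (fun q hq => hfr q (List.mem_cons_of_mem _ hq))
    · by_cases h2 : pvS.contains p.1
      · have h2m : p.1 ∈ pvS := by simpa using h2
        rw [if_neg (by simp [h2m]), if_neg (by simp [h2m])]
        exact ih acc hnd.2 hknd (fun q hq => hfr q (List.mem_cons_of_mem _ hq))
      · have h1' : cfun p.1 = false := by simpa using h1
        have h2m : p.1 ∉ pvS := by simpa using h2
        rw [if_pos (by simp [hp, h1', h2m]), if_pos (by simp [h1', h2m])]
        have hacc : acc.contains p.1 = false := by rw [hp, h1']
        rw [ih (acc.insert p.1 p.2) hnd.2 (PySem.Dict.nodup_keys_insert acc p.1 p.2 hknd) ?fr]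
        · rw [PySem.Dict.items_insert_of_not_contains acc _ hacc, List.append_assoc]
          simp
        case fr =>
          intro q hq
          rw [PySem.Dict.contains_insert]
          have hne : q.1 ≠ p.1 := fun e => hnd.1 (e ▸ List.mem_map_of_mem hq)
          simp [hne, hfr q (List.mem_cons_of_mem _ hq)]

-- A computes: desired block (in pvD order) then leftover items (in input order)
lemma pv_A (nutrition : List (String × String)) :
    clean_nutrition_facts_py nutrition
      = (pvD.filter (fun k => PySem.Dict.contains (PySem.Dict.ofList nutrition) k)).map
          (fun k => (k, (PySem.Dict.get? (PySem.Dict.ofList nutrition) k).getD ""))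
        ++ (PySem.Dict.ofList nutrition).items.filter
            (fun p => !(decide (p.1 ∈ pvD)) && !(pvS.contains p.1)) := by
  simp only [clean_nutrition_facts_py]
  set d := PySem.Dict.ofList nutrition with hd
  have hdnd : d.keys.Nodup := by rw [hd]; exact PySem.Dict.nodup_keys_ofList nutrition
  have h1 := pv_pass1 d pvD PySem.Dict.empty pvD_nodup (fun k _ => PySem.Dict.contains_empty k)
  have h1n := pv_pass1_nodup d pvD PySem.Dict.empty PySem.Dict.nodup_keys_empty
  set c0 := pvD.foldl (fun c key =>
      if PySem.Dict.contains d key then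
        PySem.Dict.insert c key ((PySem.Dict.get? d key).getD "")
      else c) PySem.Dict.empty with hc0
  have hkeys : c0.keys = pvD.filter (fun k => PySem.Dict.contains d k) := by
    show c0.items.map (fun x => x.1) = _
    rw [h1, show (PySem.Dict.empty : PySem.Dict String String).items = [] from rfl,
        List.nil_append, List.map_map]
    have hcomp : ((fun x : String × String => x.1) ∘ fun k => (k, (PySem.Dict.get? d k).getD ""))
        = id := funext fun k => rfl
    rw [hcomp, List.map_id]
  have hfr : ∀ p ∈ d.items, c0.contains p.1
      = (decide (p.1 ∈ pvD) && PySem.Dict.contains d p.1) := by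
    intro p _
    rw [PySem.Dict.contains_eq_decide_mem_keys, hkeys]
    simp [List.mem_filter]
  have h2 := pv_pass2 (fun k => decide (k ∈ pvD) && PySem.Dict.contains d k) d.items c0 hdnd h1n hfr
  rw [h2, h1, show (PySem.Dict.empty : PySem.Dict String String).items = [] from rfl,
      List.nil_append]
  congr 1
  apply List.filter_congr
  intro p hp
  have hcont : PySem.Dict.contains d p.1 = true := by
    rw [PySem.Dict.contains_eq_decide_mem_keys]
    simpa using PySem.Dict.mem_keys_of_mem_items d hp
  simp [hcont]

-- B computes: the f-image of the rank-sorted non-skipped key list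
lemma pv_B (nutrition : List (String × String)) :
    clean_nutrition_facts_py_alt nutrition
      = (PySem.List.sorted ((PySem.Dict.ofList nutrition).keys.filter
            (fun k => !(pvS.contains k))) pvK false).map
          (fun k => (k, (PySem.Dict.get? (PySem.Dict.ofList nutrition) k).getD "")) := by
  simp only [clean_nutrition_facts_py_alt]
  set d := PySem.Dict.ofList nutrition with hd
  have hdnd : d.keys.Nodup := by rw [hd]; exact PySem.Dict.nodup_keys_ofList nutrition
  have hskip : (fun key => !(PySem.Set.contains (PySem.Set.ofList pvS) key))
      = (fun key => !(pvS.contains key)) := by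
    funext k; rfl
  have hkey : (fun key => PySem.Dict.getD
      ((PySem.List.enumerate pvD).foldl (fun r p => PySem.Dict.insert r p.2 p.1) PySem.Dict.empty)
      key ((pvD.length : Int))) = pvK := by
    funext k; rfl
  rw [hskip, hkey]
  set ks := PySem.List.sorted (d.keys.filter (fun k => !(pvS.contains k))) pvK false with hks
  have hksnd : ks.Nodup := by
    rw [hks]
    exact (PySem.List.sorted_perm (d.keys.filter (fun k => !(pvS.contains k))) pvK false).symm.nodup
      (hdnd.filter _)
  have := PySem.Dict.items_foldl_insert_fresh ks (fun a => a)
    (fun a => (PySem.Dict.get? d a).getD "") PySem.Dict.empty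
    (fun a _ => PySem.Dict.contains_empty a) (by simpa using hksnd)
  simpa using this

-- the two leftover blocks coincide
lemma pv_chunk2 (d : PySem.Dict String String) (hnd : d.keys.Nodup) :
    ((d.keys.filter (fun k => !(pvS.contains k))).filter (fun k => !(decide (k ∈ pvD)))).map
        (fun k => (k, (PySem.Dict.get? d k).getD ""))
      = d.items.filter (fun p => !(decide (p.1 ∈ pvD)) && !(pvS.contains p.1)) := by
  rw [List.filter_filter]
  show ((d.items.map (fun x => x.1)).filter _).map _ = _
  rw [List.filter_map, List.map_map]
  have hmem : ∀ p ∈ d.items.filter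
      ((fun a => !(decide (a ∈ pvD)) && !(pvS.contains a)) ∘ (fun x => x.1)),
      ((fun k => (k, (PySem.Dict.get? d k).getD "")) ∘ (fun x => x.1)) p = p := by
    intro p hp
    have hpi : p ∈ d.items := List.mem_of_mem_filter hp
    have : PySem.Dict.get? d p.1 = some p.2 := by
      exact PySem.Dict.get?_of_mem_items d (by simpa using hpi) hnd
    simp [Function.comp, this]
  rw [List.map_congr_left hmem, List.map_id']
  apply List.filter_congr
  intro p _
  simp [Function.comp]

lemma pv_main (nutrition : List (String × String)) :
    clean_nutrition_facts_py nutrition = clean_nutrition_facts_py_alt nutrition := by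
  rw [pv_A, pv_B]
  set d := PySem.Dict.ofList nutrition with hd
  have hdnd : d.keys.Nodup := by rw [hd]; exact PySem.Dict.nodup_keys_ofList nutrition
  rw [pv_sorted_char (d.keys.filter (fun k => !(pvS.contains k))) (hdnd.filter _),
      List.map_append]
  congr 1
  · congr 1
    apply List.filter_congr
    intro a ha
    have hskipm : a ∉ pvS := by simpa using pvD_not_skip a ha
    rw [PySem.Dict.contains_eq_decide_mem_keys]
    simp [List.mem_filter, hskipm]
  · exact (pv_chunk2 d hdnd).symm

-- ===== VERDICT (by name: the statement is the Claim_ definition above) =====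
theorem clean_nutrition_facts_py_spec : Claim_equal_clean_nutrition_facts_py := by
  intro nutrition _
  unfold Spec_clean_nutrition_facts_py
  exact pv_main nutrition
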